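-- pv_equiv track=rewrite | github.com/shell909090/ai | webuiapi/zit-gen.py | filter_devices_by_ratio
-- ===== SOURCE A (Python) =====
-- import math
--
-- def filter_devices_by_ratio(devices: list[dict]) -> list[dict]:
--     """
--     过滤掉相同纵横比的设备，只保留最高分辨率。
--     例如: 3840x2160 和 1920x1080 都是 16:9，只保留 3840x2160
--     """
--     ratio_groups = {}
--
--     for device in devices:
--         width = device['width']
--         height = device['height']
--
--         # 计算最简比例 (使用GCD)
--         gcd = math.gcd(width, height)
--         ratio = (width // gcd, height // gcd)
--
--         # 按比例分组，保留分辨率最高的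
--         if ratio not in ratio_groups:
--             ratio_groups[ratio] = device
--         else:
--             # 比较分辨率大小（使用实际像素数）
--             current_pixels = width * height
--             existing_pixels = ratio_groups[ratio]['width'] * ratio_groups[ratio]['height']
--             if current_pixels > existing_pixels:
--                 ratio_groups[ratio] = device
--
--     return list(ratio_groups.values())
-- ===== SOURCE B (Python) =====
-- import math
--
-- def _ratio(device):
--     g = math.gcd(device['width'], device['height'])
--     return (device['width'] // g, device['height'] // g)
--
-- def _pixels(device):
--     return device['width'] * device['height']
--
-- def filter_devices_by_ratio(devices: list[dict]) -> list[dict]: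
--     # Group all devices by reduced aspect ratio, then pick the highest-resolution
--     # device of each group (max keeps the first one on ties, like A).
--     groups = {}
--     for device in devices:
--         groups.setdefault(_ratio(device), []).append(device)
--     return [max(grp, key=_pixels) for grp in groups.values()]
-- ===== Notes on version B (the rewrite author's own statement) =====
-- stated objective: alternative
-- what changed: A keeps a running best device per reduced aspect ratio inside one loop; B first groups all devices by reduced ratio into lists, then in a second pass selects each group's winner with max(key=pixel count).
import Mathlib
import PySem

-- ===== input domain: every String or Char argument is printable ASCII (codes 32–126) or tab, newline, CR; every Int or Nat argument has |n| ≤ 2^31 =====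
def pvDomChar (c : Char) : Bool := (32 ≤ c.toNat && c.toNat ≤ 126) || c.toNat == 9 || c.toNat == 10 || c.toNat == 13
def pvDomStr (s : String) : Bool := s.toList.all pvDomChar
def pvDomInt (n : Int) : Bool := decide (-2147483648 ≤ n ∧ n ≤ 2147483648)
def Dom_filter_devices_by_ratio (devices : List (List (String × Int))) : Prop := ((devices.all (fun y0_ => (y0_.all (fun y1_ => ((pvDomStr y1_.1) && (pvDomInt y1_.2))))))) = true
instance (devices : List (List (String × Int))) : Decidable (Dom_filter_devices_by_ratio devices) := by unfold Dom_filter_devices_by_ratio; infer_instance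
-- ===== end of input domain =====

-- B groups devices by reduced aspect ratio first and then picks each group's
-- highest-pixel device in a second pass (alternative decomposition, same cost).

-- device['width'] / device['height']: first-match lookup in the association list (0 only outside Pre_)
def pvGet (device : List (String × Int)) (k : String) : Int :=
  ((device.find? (fun p => p.1 == k)).map (fun p => p.2)).getD 0

-- d['width'] * d['height']  (Source B's _pixels)
def pvPixels (device : List (String × Int)) : Int :=
  pvGet device "width" * pvGet device "height"

-- ===== PORT A =====
def filter_devices_by_ratio (devices : List (List (String × Int))) : List (List (String × Int)) :=
  let ratio_groups : PySem.Dict (Int × Int) (List (String × Int)) :=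
    devices.foldl (fun ratio_groups device =>
      let width := pvGet device "width"
      let height := pvGet device "height"
      -- math.gcd = Int.gcd (nonnegative); // is Python floor division
      let g : Int := (Int.gcd width height : Int)
      let ratio : Int × Int := (PySem.Int.floordiv width g, PySem.Int.floordiv height g)
      if ratio_groups.contains ratio = false then
        ratio_groups.insert ratio device
      else
        let current_pixels := width * height
        let existing_pixels :=
          pvGet (ratio_groups.getD ratio []) "width" * pvGet (ratio_groups.getD ratio []) "height"
        if existing_pixels < current_pixels then ratio_groups.insert ratio device
        else ratio_groups)
      PySem.Dict.empty
  ratio_groups.values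

-- ===== PORT B =====
-- Source B's _ratio(device)
def pvRatioOf (device : List (String × Int)) : Int × Int :=
  let g : Int := (Int.gcd (pvGet device "width") (pvGet device "height") : Int)
  (PySem.Int.floordiv (pvGet device "width") g, PySem.Int.floordiv (pvGet device "height") g)

def filter_devices_by_ratio_alt (devices : List (List (String × Int))) : List (List (String × Int)) :=
  let groups : PySem.Dict (Int × Int) (List (List (String × Int))) :=
    devices.foldl (fun groups device =>
      groups.modify (pvRatioOf device) [] (fun grp => grp ++ [device]))
      PySem.Dict.empty
  groups.values.map (fun grp => (PySem.List.max? grp pvPixels).getD [])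

-- ===== PRECONDITION & SPEC =====
-- Pre_ excludes exactly the inputs on which the Python A raises: a device missing the
-- 'width' or 'height' key (KeyError) or with width = height = 0 (gcd 0, ZeroDivisionError);
-- B raises there too.
def Pre_filter_devices_by_ratio (devices : List (List (String × Int))) : Prop :=
  ∀ device ∈ devices,
    (device.find? (fun p => p.1 == "width")).isSome ∧
    (device.find? (fun p => p.1 == "height")).isSome ∧
    ¬ (pvGet device "width" = 0 ∧ pvGet device "height" = 0)
instance (devices : List (List (String × Int))) : Decidable (Pre_filter_devices_by_ratio devices) := by unfold Pre_filter_devices_by_ratio; infer_instance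

def pvWitness_filter_devices_by_ratio : (List (List (String × Int))) :=
  [[("width", 3840), ("height", 2160)], [("width", 1920), ("height", 1080)]]

def Spec_filter_devices_by_ratio (devices : List (List (String × Int))) (out : List (List (String × Int))) : Prop := out = filter_devices_by_ratio_alt devices
instance (devices : List (List (String × Int))) (out : List (List (String × Int))) : Decidable (Spec_filter_devices_by_ratio devices out) := by unfold Spec_filter_devices_by_ratio; infer_instance

-- ===== CLAIM (what is proved, stated in full; the proofs are below) =====
def Claim_equal_filter_devices_by_ratio : Prop := ∀ (devices : List (List (String × Int))), Dom_filter_devices_by_ratio devices → Pre_filter_devices_by_ratio devices → Spec_filter_devices_by_ratio devices (filter_devices_by_ratio devices)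

-- ===== LEMMAS AND PROOFS =====

-- A's loop body / B's loop body, named for the proofs (definitionally the lambdas in the ports)
def pvStepA (ratio_groups : PySem.Dict (Int × Int) (List (String × Int)))
    (device : List (String × Int)) : PySem.Dict (Int × Int) (List (String × Int)) :=
  let width := pvGet device "width"
  let height := pvGet device "height"
  let g : Int := (Int.gcd width height : Int)
  let ratio : Int × Int := (PySem.Int.floordiv width g, PySem.Int.floordiv height g)
  if ratio_groups.contains ratio = false then
    ratio_groups.insert ratio device
  else
    let current_pixels := width * height
    let existing_pixels :=
      pvGet (ratio_groups.getD ratio []) "width" * pvGet (ratio_groups.getD ratio []) "height"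
    if existing_pixels < current_pixels then ratio_groups.insert ratio device
    else ratio_groups

def pvStepB (groups : PySem.Dict (Int × Int) (List (List (String × Int))))
    (device : List (String × Int)) : PySem.Dict (Int × Int) (List (List (String × Int))) :=
  groups.modify (pvRatioOf device) [] (fun grp => grp ++ [device])

def pvBest (grp : List (List (String × Int))) : List (String × Int) :=
  (PySem.List.max? grp pvPixels).getD []

def pvF (p : (Int × Int) × List (List (String × Int))) : (Int × Int) × List (String × Int) :=
  (p.1, pvBest p.2)

-- key-preservation and lookup transfer along the pvF relation
lemma pv_contains_eq (d1 : PySem.Dict (Int × Int) (List (String × Int)))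
    (d2 : PySem.Dict (Int × Int) (List (List (String × Int))))
    (h : d1.items = d2.items.map pvF) (r : Int × Int) :
    d1.contains r = d2.contains r := by
  simp [PySem.Dict.contains, h, List.any_map, Function.comp_def, pvF]

lemma pv_get?_eq (d1 : PySem.Dict (Int × Int) (List (String × Int)))
    (d2 : PySem.Dict (Int × Int) (List (List (String × Int))))
    (h : d1.items = d2.items.map pvF) (r : Int × Int) :
    d1.get? r = (d2.get? r).map pvBest := by
  simp [PySem.Dict.get?, h, List.find?_map, Function.comp_def, pvF, Option.map_map]

-- B's running max over a group grows exactly by A's strict-comparison rule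
lemma pv_max?_append (grp : List (List (String × Int))) (m y : List (String × Int))
    (hm : PySem.List.max? grp pvPixels = some m) :
    PySem.List.max? (grp ++ [y]) pvPixels =
      (if pvPixels m < pvPixels y then some y else some m) := by
  simp only [PySem.List.max?] at hm ⊢
  rw [List.foldl_append, hm]
  simp

lemma pvStepA_eq (d1 : PySem.Dict (Int × Int) (List (String × Int))) (device : List (String × Int)) :
    pvStepA d1 device =
      (if d1.contains (pvRatioOf device) = false then d1.insert (pvRatioOf device) device
       else if pvPixels (d1.getD (pvRatioOf device) []) < pvPixels device then
         d1.insert (pvRatioOf device) device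
       else d1) := rfl

-- one loop iteration preserves the simulation invariant
lemma pv_step (device : List (String × Int))
    (d1 : PySem.Dict (Int × Int) (List (String × Int)))
    (d2 : PySem.Dict (Int × Int) (List (List (String × Int))))
    (h : d1.items = d2.items.map pvF)
    (hne : ∀ p ∈ d2.items, p.2 ≠ ([] : List (List (String × Int))))
    (hnd : d2.keys.Nodup) :
    (pvStepA d1 device).items = (pvStepB d2 device).items.map pvF ∧
    (∀ p ∈ (pvStepB d2 device).items, p.2 ≠ ([] : List (List (String × Int)))) ∧
    (pvStepB d2 device).keys.Nodup := by
  have hc := pv_contains_eq d1 d2 h (pvRatioOf device)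
  have hstepB : pvStepB d2 device
      = d2.insert (pvRatioOf device) (d2.getD (pvRatioOf device) [] ++ [device]) := rfl
  by_cases hb : d2.contains (pvRatioOf device) = true
  · -- ratio already present: A compares pixel counts, B appends to the group
    obtain ⟨grp, hg⟩ : ∃ grp, d2.get? (pvRatioOf device) = some grp := by
      rw [PySem.Dict.contains_eq_isSome_get?] at hb
      exact Option.isSome_iff_exists.mp hb
    have hgmem := PySem.Dict.mem_items_of_get?_eq_some d2 hg
    have hgne : grp ≠ [] := hne _ hgmem
    obtain ⟨m, hm⟩ : ∃ m, PySem.List.max? grp pvPixels = some m := by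
      cases hmm : PySem.List.max? grp pvPixels with
      | none => exact absurd ((PySem.List.max?_eq_none_iff grp pvPixels).mp hmm) hgne
      | some m => exact ⟨m, rfl⟩
    have hbestg : pvBest grp = m := by simp [pvBest, hm]
    have hgetD2 : d2.getD (pvRatioOf device) [] = grp := by
      simp [PySem.Dict.getD, hg]
    have hgetD1 : d1.getD (pvRatioOf device) [] = m := by
      simp [PySem.Dict.getD, pv_get?_eq d1 d2 h, hg, hbestg]
    have hitemsB : (pvStepB d2 device).items
        = d2.items.map (fun p => if p.1 == pvRatioOf device then (pvRatioOf device, grp ++ [device]) else p) := by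
      rw [hstepB, PySem.Dict.items_insert_of_contains d2 _ hb, hgetD2]
    have hval : ∀ p ∈ d2.items, p.1 = pvRatioOf device → p.2 = grp := by
      intro p hp hpr
      have : d2.get? (pvRatioOf device) = some p.2 := by
        apply PySem.Dict.get?_of_mem_items d2 _ hnd
        rw [← hpr]; exact hp
      rw [hg] at this; exact (Option.some.inj this).symm
    refine ⟨?_, ?_, ?_⟩
    · rw [pvStepA_eq, hc, hb, if_neg (show ¬(true = false) by simp), hgetD1, hitemsB]
      by_cases hlt : pvPixels m < pvPixels device
      · rw [if_pos hlt, PySem.Dict.items_insert_of_contains d1 _ (hc.trans hb), h,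
          List.map_map, List.map_map]
        apply List.map_congr_left
        intro p hp
        by_cases hpr : p.1 = pvRatioOf device
        · have hp2 := hval p hp hpr
          simp [Function.comp, pvF, hpr, hp2, pvBest, pv_max?_append grp m device hm, hm, hlt]
        · simp [Function.comp, pvF, hpr]
      · rw [if_neg hlt, h, List.map_map]
        apply List.map_congr_left
        intro p hp
        by_cases hpr : p.1 = pvRatioOf device
        · have hp2 := hval p hp hpr
          simp [Function.comp, pvF, hpr, hp2, pvBest, pv_max?_append grp m device hm, hm, hlt]
        · simp [Function.comp, pvF, hpr]
    · rw [hitemsB]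
      intro p hp
      obtain ⟨q, hq, rfl⟩ := List.mem_map.mp hp
      by_cases hqr : q.1 = pvRatioOf device
      · simp [hqr]
      · simpa [hqr] using hne q hq
    · rw [hstepB]; exact PySem.Dict.nodup_keys_insert d2 _ _ hnd
  · -- new ratio: both sides append a fresh entry
    have hb' : d2.contains (pvRatioOf device) = false := by
      simpa using hb
    have hitemsB : (pvStepB d2 device).items = d2.items ++ [(pvRatioOf device, [device])] := by
      rw [hstepB, PySem.Dict.getD_of_not_contains d2 _ hb',
        PySem.Dict.items_insert_of_not_contains d2 _ hb']
      simp
    refine ⟨?_, ?_, ?_⟩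
    · rw [pvStepA_eq, hc, hb', if_pos rfl,
        PySem.Dict.items_insert_of_not_contains d1 _ (hc.trans hb'), hitemsB, h]
      simp [pvF, pvBest, PySem.List.max?]
    · rw [hitemsB]
      intro p hp
      rcases List.mem_append.mp hp with hp | hp
      · exact hne p hp
      · simp at hp; subst hp; simp
    · rw [hstepB]; exact PySem.Dict.nodup_keys_insert d2 _ _ hnd

-- the whole loop preserves the invariant
lemma pv_loop (devices : List (List (String × Int))) :
    ∀ (d1 : PySem.Dict (Int × Int) (List (String × Int)))
      (d2 : PySem.Dict (Int × Int) (List (List (String × Int)))),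
      d1.items = d2.items.map pvF →
      (∀ p ∈ d2.items, p.2 ≠ ([] : List (List (String × Int)))) →
      d2.keys.Nodup →
      (devices.foldl pvStepA d1).items = (devices.foldl pvStepB d2).items.map pvF := by
  induction devices with
  | nil => intro d1 d2 h _ _; simpa using h
  | cons device rest ih =>
    intro d1 d2 h hne hnd
    obtain ⟨h', hne', hnd'⟩ := pv_step device d1 d2 h hne hnd
    simpa using ih _ _ h' hne' hnd'

lemma portA_eq (devices : List (List (String × Int))) :
    filter_devices_by_ratio devices = (devices.foldl pvStepA PySem.Dict.empty).values := rfl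

lemma portB_eq (devices : List (List (String × Int))) :
    filter_devices_by_ratio_alt devices
      = ((devices.foldl pvStepB PySem.Dict.empty).values).map pvBest := rfl

-- ===== VERDICT (by name: the statement is the Claim_ definition above) =====
theorem filter_devices_by_ratio_spec : Claim_equal_filter_devices_by_ratio := by
  intro devices _ _
  unfold Spec_filter_devices_by_ratio
  have h := pv_loop devices PySem.Dict.empty PySem.Dict.empty rfl
    (by intro p hp; simp [PySem.Dict.empty] at hp) PySem.Dict.nodup_keys_empty
  rw [portA_eq, portB_eq]
  simp [PySem.Dict.values, h, List.map_map, Function.comp, pvF]
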